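-- pv_equiv track=rewrite | github.com/pengzhefu/Algorithms-in-Python | Stack Class.py | ifmatch
-- ===== SOURCE A (Python) =====
-- class Stack:
--      def __init__(self):
--          self.items = []
--
--      def isEmpty(self):
--          return self.items == []
--
--      def push(self, thing):
--          self.items.append(thing)
--
--      def pop(self):
--          return self.items.pop()
--
--      def peek(self):
--          return self.items[len(self.items)-1]
--
--      def size(self):
--          return len(self.items)
--
-- def ifmatch(mystr):
--     stack1 = Stack()
--     for chars in mystr:
--         if stack1.isEmpty():
--             stack1.push(chars)
--         else:
--             if chars == stack1.peek():
--                 stack1.push(chars)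
--             else:
--                 stack1.pop()
--     return stack1.isEmpty()
-- ===== SOURCE B (Python) =====
-- def ifmatch(mystr):
--     # Stage 1: run-length encode the string into (char, length) runs.
--     runs = []
--     for c in mystr:
--         if runs and runs[-1][0] == c:
--             runs[-1][1] += 1
--         else:
--             runs.append([c, 1])
--     # Stage 2: consume whole runs at once with batch arithmetic:
--     # a run of k equal chars either merges into the pending run (m += k)
--     # or cancels against it (m -= k, flipping ownership if k > m).
--     ch, m = '', 0
--     for c, k in runs:
--         if m == 0 or c == ch:
--             ch, m = c, m + k
--         elif k <= m:
--             m -= k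
--         else:
--             ch, m = c, k - m
--     return m == 0
-- ===== Notes on version B (the rewrite author's own statement) =====
-- stated objective: alternative
-- what changed: Replaces the per-character Stack push/pop scan by two staged passes: run-length encode the string into (char, length) runs, then fold over the runs with batch arithmetic (merge m += k, or cancel m -= k with ownership flip when k > m), so no stack of characters and no per-character push/pop exists.
import Mathlib
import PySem

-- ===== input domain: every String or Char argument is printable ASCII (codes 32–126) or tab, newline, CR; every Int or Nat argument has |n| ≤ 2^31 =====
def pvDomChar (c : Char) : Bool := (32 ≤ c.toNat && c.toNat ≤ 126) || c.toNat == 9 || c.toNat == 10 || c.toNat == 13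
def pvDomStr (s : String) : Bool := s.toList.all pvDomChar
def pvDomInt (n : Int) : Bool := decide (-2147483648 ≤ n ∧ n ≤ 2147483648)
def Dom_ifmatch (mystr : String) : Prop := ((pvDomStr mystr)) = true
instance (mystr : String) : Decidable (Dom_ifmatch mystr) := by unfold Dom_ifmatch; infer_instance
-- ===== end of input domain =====

-- B replaces A's per-character Stack push/pop scan by two staged passes: run-length encode, then batch-cancel whole runs arithmetically (alternative decomposition, same cost).


-- ===== PORT A =====
-- A's Stack methods inlined on a List Char used like Python's list:
-- push = append at the end, peek = items[len-1] (the last element), pop = drop the last.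
def ifmatchStepA (st : List Char) (c : Char) : List Char :=
  if st = [] then st ++ [c]
  else if c = st.getLast?.getD c then st ++ [c]
  else st.dropLast

def ifmatch (mystr : String) : Bool :=
  (mystr.toList.foldl ifmatchStepA []) = []

-- ===== PORT B =====
-- Stage 1: run-length encoding; runs[-1][1] += 1 becomes replacing the last pair.
def rleStep (rs : List (Char × Int)) (c : Char) : List (Char × Int) :=
  match rs.getLast? with
  | some p => if p.1 = c then rs.dropLast ++ [(p.1, p.2 + 1)] else rs ++ [(c, 1)]
  | none => [(c, 1)]

-- Stage 2: one batch step per run (python's loop body; ch='' is never read while m=0, so any default char is faithful).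
def batchStep (s : Char × Int) (r : Char × Int) : Char × Int :=
  if s.2 = 0 ∨ r.1 = s.1 then (r.1, s.2 + r.2)
  else if r.2 ≤ s.2 then (s.1, s.2 - r.2)
  else (r.1, r.2 - s.2)

def ifmatch_alt (mystr : String) : Bool :=
  ((mystr.toList.foldl rleStep []).foldl batchStep (' ', 0)).2 = 0

-- ===== PRECONDITION & SPEC =====
def Spec_ifmatch (mystr : String) (out : Bool) : Prop := out = ifmatch_alt mystr
instance (mystr : String) (out : Bool) : Decidable (Spec_ifmatch mystr out) := by unfold Spec_ifmatch; infer_instance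

-- ===== CLAIM (what is proved, stated in full; the proofs are below) =====
def Claim_equal_ifmatch : Prop := ∀ (mystr : String), Dom_ifmatch mystr → Spec_ifmatch mystr (ifmatch mystr)

-- ===== LEMMAS AND PROOFS =====

-- Proof-only per-character dynamics: (current char, multiplicity) of A's stack.
def bstep (p : Char × Int) (c : Char) : Char × Int :=
  if p.2 = 0 then (c, 1) else if c = p.1 then (p.1, p.2 + 1) else (p.1, p.2 - 1)

-- Invariant: A's stack is exactly count copies of the bstep state's char.
theorem ifmatch_inv (l : List Char) : ∀ (ch : Char) (n : Int), 0 ≤ n →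
    0 ≤ (l.foldl bstep (ch, n)).2 ∧
    l.foldl ifmatchStepA (List.replicate n.toNat ch) =
      List.replicate (l.foldl bstep (ch, n)).2.toNat (l.foldl bstep (ch, n)).1 := by
  induction l with
  | nil => intro ch n hn; exact ⟨hn, rfl⟩
  | cons c l ih =>
    intro ch n hn
    by_cases h0 : n = 0
    · subst h0
      simpa [List.foldl, ifmatchStepA, bstep] using ih c 1 (by norm_num)
    · have hn1 : 1 ≤ n := lt_of_le_of_ne hn (Ne.symm h0)
      have hne : List.replicate n.toNat ch ≠ [] := by
        simp [List.replicate_eq_nil_iff]; omega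
      have hlast : (List.replicate n.toNat ch).getLast?.getD c = ch := by
        rw [List.getLast?_replicate]
        simp [show n.toNat ≠ 0 by omega]
      by_cases hc : c = ch
      · subst hc
        have hrep : List.replicate n.toNat c ++ [c] = List.replicate (n + 1).toNat c := by
          rw [show (n+1).toNat = n.toNat + 1 by omega, List.replicate_succ']
        simpa [List.foldl, ifmatchStepA, bstep, h0, hne, hlast, hrep]
          using ih c (n + 1) (by omega)
      · have hdrop : (List.replicate n.toNat ch).dropLast = List.replicate (n - 1).toNat ch := by
          rw [show n.toNat = (n-1).toNat + 1 by omega, List.replicate_succ', List.dropLast_concat]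
        simpa [List.foldl, ifmatchStepA, bstep, h0, hne, hlast, hc, hdrop]
          using ih ch (n - 1) (by omega)

-- A run of n ≥ 1 copies of c, stepped per character, equals one batch step.
theorem foldl_bstep_replicate (n : Nat) : ∀ (s : Char × Int) (c : Char), 1 ≤ n → 0 ≤ s.2 →
    List.foldl bstep s (List.replicate n c) = batchStep s (c, (n : Int)) := by
  induction n with
  | zero => intro s c h; omega
  | succ n ih =>
    rintro ⟨ch, m⟩ c _ hm
    rw [List.replicate_succ, List.foldl_cons]
    by_cases hn : n = 0
    · subst hn
      simp only [List.replicate_zero, List.foldl_nil, bstep, batchStep]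
      split_ifs with h1 h2 h3 h4 h5 <;> simp_all <;> omega
    · have hn1 : 1 ≤ n := by omega
      by_cases h0 : m = 0
      · subst h0
        rw [show bstep (ch, (0:Int)) c = (c, 1) from by simp [bstep]]
        rw [ih (c, 1) c hn1 (by norm_num)]
        simp [batchStep]; ring
      · by_cases hc : c = ch
        · subst hc
          rw [show bstep (c, m) c = (c, m + 1) from by simp [bstep, h0]]
          rw [ih (c, m + 1) c hn1 (by omega)]
          simp [batchStep, h0]; omega
        · rw [show bstep (ch, m) c = (ch, m - 1) from by simp [bstep, h0, hc]]
          rw [ih (ch, m - 1) c hn1 (by omega)]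
          simp only [batchStep, hc]
          split_ifs with h1 h2 h3 h4 h5 h6 h7 <;>
            simp_all [Prod.ext_iff] <;> omega

theorem batchStep_nonneg (s r : Char × Int) (hs : 0 ≤ s.2) (hr : 1 ≤ r.2) :
    0 ≤ (batchStep s r).2 := by
  unfold batchStep; split_ifs <;> simp <;> omega

def expand (rs : List (Char × Int)) : List Char :=
  rs.flatMap (fun p => List.replicate p.2.toNat p.1)

-- Folding batch steps over runs = folding bstep over the expanded characters.
theorem batch_eq_bstep (rs : List (Char × Int)) : ∀ (s : Char × Int), 0 ≤ s.2 →
    (∀ p ∈ rs, 1 ≤ p.2) →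
    List.foldl batchStep s rs = List.foldl bstep s (expand rs) := by
  induction rs with
  | nil => intro s _ _; simp [expand]
  | cons r rs ih =>
    intro s hs hall
    have hr : 1 ≤ r.2 := hall r (by simp)
    have hexp : expand (r :: rs) = List.replicate r.2.toNat r.1 ++ expand rs := by
      simp [expand]
    rw [hexp, List.foldl_append, List.foldl_cons]
    have h1 := foldl_bstep_replicate r.2.toNat s r.1 (by omega) hs
    rw [show ((r.2.toNat : Int)) = r.2 by omega] at h1
    rw [h1]
    exact ih (batchStep s (r.1, r.2)) (batchStep_nonneg s (r.1, r.2) hs hr)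
      (fun p hp => hall p (List.mem_cons_of_mem _ hp))

-- One RLE step appends exactly one character to the expansion and keeps counts ≥ 1.
theorem rleStep_spec (rs : List (Char × Int)) (c : Char) (hwf : ∀ p ∈ rs, 1 ≤ p.2) :
    expand (rleStep rs c) = expand rs ++ [c] ∧ ∀ p ∈ rleStep rs c, 1 ≤ p.2 := by
  unfold rleStep
  cases h : rs.getLast? with
  | none =>
    rw [List.getLast?_eq_none_iff.mp h]
    exact ⟨by simp [expand], by simp⟩
  | some p =>
    have hne : rs ≠ [] := by
      intro h'; rw [h'] at h; simp at h
    have hmem : p ∈ rs := List.mem_of_getLast? h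
    have hp : 1 ≤ p.2 := hwf p hmem
    have hp' : rs.getLast hne = p := by
      rw [List.getLast?_eq_some_getLast hne] at h; exact Option.some.inj h
    have hrs : rs.dropLast ++ [p] = rs := by
      rw [← hp']; exact List.dropLast_append_getLast hne
    dsimp only
    by_cases hc : p.1 = c
    · subst hc
      rw [if_pos rfl]
      constructor
      · have hrep : List.replicate (p.2 + 1).toNat p.1 =
            List.replicate p.2.toNat p.1 ++ [p.1] := by
          rw [show (p.2+1).toNat = p.2.toNat + 1 by omega, List.replicate_succ']
        calc expand (rs.dropLast ++ [(p.1, p.2 + 1)])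
            = expand rs.dropLast ++ List.replicate (p.2 + 1).toNat p.1 := by
              simp [expand]
          _ = (expand rs.dropLast ++ List.replicate p.2.toNat p.1) ++ [p.1] := by
              rw [hrep, List.append_assoc]
          _ = expand (rs.dropLast ++ [p]) ++ [p.1] := by simp [expand]
          _ = expand rs ++ [p.1] := by rw [hrs]
      · intro q hq
        rcases List.mem_append.mp hq with hq | hq
        · exact hwf q (List.dropLast_subset _ hq)
        · simp at hq; subst hq; simpa using by omega
    · simp only [hc, if_false]
      exact ⟨by simp [expand], by
        intro q hq
        rcases List.mem_append.mp hq with hq | hq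
        · exact hwf q hq
        · simp at hq; subst hq; norm_num⟩

-- The RLE pass expands back to the input, with all counts ≥ 1.
theorem rle_spec (l : List Char) :
    expand (List.foldl rleStep [] l) = l ∧ ∀ p ∈ List.foldl rleStep [] l, 1 ≤ p.2 := by
  induction l using List.reverseRecOn with
  | nil => exact ⟨rfl, by simp⟩
  | append_singleton l c ih =>
    rw [List.foldl_append, List.foldl_cons, List.foldl_nil]
    obtain ⟨h1, h2⟩ := rleStep_spec _ c ih.2
    exact ⟨by rw [h1, ih.1], h2⟩

-- ===== VERDICT (by name: the statement is the Claim_ definition above) =====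
theorem ifmatch_spec : Claim_equal_ifmatch := by
  intro mystr _
  unfold Spec_ifmatch ifmatch ifmatch_alt
  obtain ⟨hrle, hwf⟩ := rle_spec mystr.toList
  rw [batch_eq_bstep _ (' ', 0) (by norm_num) hwf, hrle]
  obtain ⟨hpos, heq⟩ := ifmatch_inv mystr.toList ' ' 0 le_rfl
  rw [show List.replicate (0:Int).toNat ' ' = [] from rfl] at heq
  rw [heq]
  simp [List.replicate_eq_nil_iff]
  omega
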